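-- pv_equiv track=rewrite | github.com/joffilyfe/PC-Programs | src/scielo/bin/xml/modules/sgml2xml.py | rename_embedded_img_href
-- ===== SOURCE A (Python) =====
-- def rename_embedded_img_href(content, xml_name, new_href_list):
--     content = content.replace('<graphic href="?', '--FIXHREF--<graphic href="?')
--     items = content.split('--FIXHREF--')
--     new = ''
--     i = 0
--     for item in items:
--         if item.startswith('<graphic href="?'):
--             s = item[item.find('?'):]
--             new += '<graphic href="' + xml_name + new_href_list[i] + s[s.find('"'):]
--             i += 1
--         else:
--             new += item
--     return new
-- ===== SOURCE B (Python) =====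
-- def rename_embedded_img_href(content, xml_name, new_href_list):
--     tag = '<graphic href="?'
--     pieces = []
--     rest = content
--     i = 0
--     while True:
--         j = rest.find(tag)
--         if j == -1:
--             pieces.append(rest)
--             break
--         pieces.append(rest[:j])
--         pieces.append('<graphic href="' + xml_name + new_href_list[i])
--         i += 1
--         tail = rest[j + len(tag):]
--         q = tail.find('"')
--         rest = tail[q:] if q != -1 else ''
--     return ''.join(pieces)
-- ===== Notes on version B (the rewrite author's own statement) =====
-- stated objective: idiomatic
-- what changed: B drops A's sentinel trick (insert '--FIXHREF--' markers via str.replace, split on them, re-assemble with a startswith branch) and instead scans the string once with str.find, emitting the prefix, the renamed tag and resuming at the closing quote; Pre_ excludes href lists shorter than the tag count (IndexError), unclosed-quote tags, and content colliding with A's '--FIXHREF--' sentinel, on which A's marker trick deletes or garbles text that B keeps intact.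
-- outside the precondition, e.g. on rename_embedded_img_href('--FIXHREF--', 'x', []): A returns '', B returns '--FIXHREF--'; on rename_embedded_img_href('<graphic href="?a"', 'x', []): A raises IndexError, B raises IndexError
import Mathlib
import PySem

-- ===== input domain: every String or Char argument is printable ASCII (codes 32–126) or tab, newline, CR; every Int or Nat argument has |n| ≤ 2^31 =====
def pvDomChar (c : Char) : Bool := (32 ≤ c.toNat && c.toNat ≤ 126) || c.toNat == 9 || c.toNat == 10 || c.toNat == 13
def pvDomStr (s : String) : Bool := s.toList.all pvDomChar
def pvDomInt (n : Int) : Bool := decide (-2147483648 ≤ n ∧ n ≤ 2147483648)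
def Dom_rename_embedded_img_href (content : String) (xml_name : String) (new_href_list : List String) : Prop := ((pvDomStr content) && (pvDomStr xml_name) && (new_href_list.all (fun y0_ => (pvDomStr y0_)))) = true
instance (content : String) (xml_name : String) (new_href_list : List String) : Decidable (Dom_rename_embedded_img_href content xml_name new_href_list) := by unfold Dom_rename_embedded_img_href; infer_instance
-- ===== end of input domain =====

-- B replaces A's marker-insert / split / startswith loop by a single find-driven scan over the
-- string; same return value on every input admitted by Pre_ (objective: idiomatic).

-- shared string literals of the two Python programs
def pvTag : List Char := "<graphic href=\"?".toList
def pvMarker : List Char := "--FIXHREF--".toList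
def pvHdr : List Char := "<graphic href=\"".toList

-- ===== PORT A =====
def rename_embedded_img_href (content : String) (xml_name : String) (new_href_list : List String) : String :=
  -- content = content.replace('<graphic href="?', '--FIXHREF--<graphic href="?')
  let content1 := PySem.Chars.replace content.toList pvTag (pvMarker ++ pvTag)
  -- items = content.split('--FIXHREF--')
  let items := PySem.Chars.splitOn content1 pvMarker
  -- new = ''; i = 0; for item in items: ...
  -- new_href_list[i] is ported with default "": Pre_ keeps every reached index in range
  -- (beyond it Python raises IndexError)
  let st := items.foldl (fun (st : List Char × Int) item =>
      if PySem.Chars.startswith item pvTag then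
        let s := PySem.List.slice item (some (PySem.Chars.find item ['?'])) none
        (st.1 ++ pvHdr ++ xml_name.toList ++ (PySem.List.pyGetD new_href_list st.2 "").toList
           ++ PySem.List.slice s (some (PySem.Chars.find s ['"'])) none, st.2 + 1)
      else (st.1 ++ item, st.2)) (([] : List Char), (0 : Int))
  String.ofList st.1

-- ===== PORT B =====
def pvAltGo (xml : List Char) (hrefs : List String) : ℕ → List Char → Int → List Char
  -- fuel is only a totality guard: every iteration consumes ≥ 16 characters, and the
  -- wrapper below passes fuel = length + 1, so the 0 case is never reached
  | 0, rest, _ => rest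
  | fuel + 1, rest, i =>
    -- j = rest.find(tag)
    let j := PySem.Chars.find rest pvTag
    if j = -1 then rest        -- pieces.append(rest); break
    else
      -- pieces.append(rest[:j]); pieces.append('<graphic href="' + xml_name + new_href_list[i]); i += 1
      -- (new_href_list[i] ported with default "", as in port A)
      PySem.List.slice rest none (some j) ++ pvHdr ++ xml ++ (PySem.List.pyGetD hrefs i "").toList ++
        pvAltGo xml hrefs fuel
          -- tail = rest[j + len(tag):]; q = tail.find('"'); rest = tail[q:] if q != -1 else \'\'
          (let tail := PySem.List.slice rest (some (j + 16)) none
           let q := PySem.Chars.find tail ['"']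
           if q = -1 then [] else PySem.List.slice tail (some q) none)
          (i + 1)

def rename_embedded_img_href_alt (content : String) (xml_name : String) (new_href_list : List String) : String :=
  String.ofList (pvAltGo xml_name.toList new_href_list (content.toList.length + 1) content.toList 0)

-- ===== PRECONDITION & SPEC =====
-- Pre_ excludes (i) href lists with fewer entries than graphic tags, where A raises IndexError,
-- (ii) content in which some graphic tag's href lacks a closing double quote (malformed markup,
-- outside the function's natural domain; A then keeps only the last character of that tail), and
-- (iii) content that collides with A's internal sentinel — it contains '--FIXHREF--', or a text
-- run ending in '--FIXHREF' / '--FIXHREF-' directly before a graphic tag — where A's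
-- marker-insert/split trick mis-splits and silently deletes or garbles text, an accident of A's
-- encoding that B (which uses no sentinel) does not reproduce.
def Pre_rename_embedded_img_href (content : String) (xml_name : String) (new_href_list : List String) : Prop :=
  (PySem.Chars.splitOn content.toList pvTag).length ≤ new_href_list.length + 1 ∧
  (∀ p ∈ (PySem.Chars.splitOn content.toList pvTag).tail, PySem.Chars.isIn ['"'] p = true) ∧
  PySem.Chars.isIn pvMarker content.toList = false ∧
  PySem.Chars.isIn ("--FIXHREF".toList ++ pvTag) content.toList = false ∧
  PySem.Chars.isIn ("--FIXHREF-".toList ++ pvTag) content.toList = false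
instance (content : String) (xml_name : String) (new_href_list : List String) : Decidable (Pre_rename_embedded_img_href content xml_name new_href_list) := by unfold Pre_rename_embedded_img_href; infer_instance

def pvWitness_rename_embedded_img_href : String × String × List String :=
  ("<graphic href=\"?f1.jpg\"/>", "v1n1", ["-g01.jpg"])

def Spec_rename_embedded_img_href (content : String) (xml_name : String) (new_href_list : List String) (out : String) : Prop := out = rename_embedded_img_href_alt content xml_name new_href_list
instance (content : String) (xml_name : String) (new_href_list : List String) (out : String) : Decidable (Spec_rename_embedded_img_href content xml_name new_href_list out) := by unfold Spec_rename_embedded_img_href; infer_instance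

-- ===== CLAIM (what is proved, stated in full; the proofs are below) =====
def Claim_equal_rename_embedded_img_href : Prop := ∀ (content : String) (xml_name : String) (new_href_list : List String), Dom_rename_embedded_img_href content xml_name new_href_list → Pre_rename_embedded_img_href content xml_name new_href_list → Spec_rename_embedded_img_href content xml_name new_href_list (rename_embedded_img_href content xml_name new_href_list)

-- ===== LEMMAS AND PROOFS =====

-- ---- basic equations for PySem.Chars.replace ----
theorem pvRgo_eq (old new : List Char) (hold : old ≠ []) :
    ∀ (fuel : ℕ) (l acc : List Char), l.length ≤ fuel →
      PySem.Chars.replace.go old new fuel l acc = acc.reverse ++ PySem.Chars.replace l old new := by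
  intro fuel
  induction fuel using Nat.strong_induction_on with
  | _ fuel ih =>
    intro l acc h
    match fuel, l with
    | 0, l =>
      have : l = [] := by cases l <;> simp_all
      subst this
      simp [PySem.Chars.replace.go, PySem.Chars.replace, hold]
    | f + 1, [] => simp [PySem.Chars.replace.go, PySem.Chars.replace, hold]
    | f + 1, c :: t =>
      have hol : 1 ≤ old.length := by cases old <;> simp_all
      have ht : t.length ≤ f := by simp at h; omega
      have hd : (List.drop old.length (c :: t)).length ≤ f := by
        simp [List.length_drop]; omega
      have hrepl : PySem.Chars.replace (c :: t) old new
          = if old.isPrefixOf (c :: t) = true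
            then new ++ PySem.Chars.replace (List.drop old.length (c :: t)) old new
            else c :: PySem.Chars.replace t old new := by
        rw [show PySem.Chars.replace (c :: t) old new
              = PySem.Chars.replace.go old new (c :: t).length (c :: t) [] from by
            simp [PySem.Chars.replace, hold]]
        simp only [List.length_cons]
        rw [PySem.Chars.replace.go]
        split
        · rw [ih t.length (by omega) _ _ (by simp [List.length_drop]; omega)]; simp
        · rw [ih t.length (by omega) _ _ le_rfl]; simp
      rw [PySem.Chars.replace.go, hrepl]
      split
      · rw [ih f (by omega) _ _ hd]; simp
      · rw [ih f (by omega) _ _ ht]; simp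

theorem pvReplace_nil (old new : List Char) (hold : old ≠ []) :
    PySem.Chars.replace [] old new = [] := by
  simp [PySem.Chars.replace, PySem.Chars.replace.go, hold]

theorem pvReplace_pref (old new l : List Char) (hold : old ≠ []) (hpre : old <+: l) :
    PySem.Chars.replace l old new = new ++ PySem.Chars.replace (List.drop old.length l) old new := by
  have hol : 1 ≤ old.length := by cases old <;> simp_all
  cases l with
  | nil =>
    have : old = [] := List.prefix_nil.mp hpre
    exact absurd this hold
  | cons c t =>
    rw [show PySem.Chars.replace (c :: t) old new
          = PySem.Chars.replace.go old new (c :: t).length (c :: t) [] from by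
        simp [PySem.Chars.replace, hold]]
    simp only [List.length_cons]
    rw [PySem.Chars.replace.go]
    rw [if_pos (List.isPrefixOf_iff_prefix.mpr hpre)]
    rw [pvRgo_eq old new hold _ _ _ (by simp [List.length_drop]; omega)]
    simp

theorem pvReplace_cons (old new : List Char) (c : Char) (t : List Char) (hold : old ≠ [])
    (hnp : ¬ old <+: (c :: t)) :
    PySem.Chars.replace (c :: t) old new = c :: PySem.Chars.replace t old new := by
  rw [show PySem.Chars.replace (c :: t) old new
        = PySem.Chars.replace.go old new (c :: t).length (c :: t) [] from by
      simp [PySem.Chars.replace, hold]]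
  simp only [List.length_cons]
  rw [PySem.Chars.replace.go]
  rw [if_neg (by simpa [List.isPrefixOf_iff_prefix] using hnp)]
  rw [pvRgo_eq old new hold _ _ _ le_rfl]
  simp

theorem pvReplace_skip (old new : List Char) (hold : old ≠ []) :
    ∀ (u v : List Char), (∀ k < u.length, ¬ old <+: List.drop k (u ++ v)) →
      PySem.Chars.replace (u ++ v) old new = u ++ PySem.Chars.replace v old new := by
  intro u
  induction u with
  | nil => simp
  | cons c u' ih =>
    intro v h
    have h0 : ¬ old <+: (c :: (u' ++ v)) := by
      have := h 0 (by simp)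
      simpa using this
    rw [List.cons_append, pvReplace_cons old new _ _ hold h0]
    rw [ih v (fun k hk => by
      have := h (k + 1) (by simp; omega)
      simpa using this)]
    simp

theorem pvReplace_none (old new l : List Char) (hold : old ≠ [])
    (h : ∀ k, ¬ old <+: List.drop k l) : PySem.Chars.replace l old new = l := by
  have := pvReplace_skip old new hold l [] (fun k hk => by simpa using h k)
  simpa [pvReplace_nil old new hold] using this

-- ---- basic equations for PySem.Chars.splitOn ----
theorem pvModifyHead_id (X : List (List Char)) :
    List.modifyHead (fun x => x) X = X := by cases X <;> simp

theorem pvModifyHead_comp (a b : List Char) (X : List (List Char)) :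
    List.modifyHead (fun x => a ++ x) (List.modifyHead (fun x => b ++ x) X)
      = List.modifyHead (fun x => (a ++ b) ++ x) X := by cases X <;> simp

theorem pvSgo_eq (sep : List Char) (hsep : sep ≠ []) :
    ∀ (fuel : ℕ) (l cur : List Char) (acc : List (List Char)), l.length < fuel →
      PySem.Chars.splitOn.go sep fuel l cur acc
        = acc.reverse ++ List.modifyHead (fun x => cur.reverse ++ x) (PySem.Chars.splitOn l sep) := by
  intro fuel
  induction fuel using Nat.strong_induction_on with
  | _ fuel ih =>
    intro l cur acc h
    match fuel, l with
    | 0, l => exact absurd h (by omega)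
    | f + 1, [] =>
      simp [PySem.Chars.splitOn.go, PySem.Chars.splitOn]
    | f + 1, c :: t =>
      have hsl : 1 ≤ sep.length := by cases sep <;> simp_all
      have h' : t.length + 1 < f + 1 := by simpa using h
      have hsplit : PySem.Chars.splitOn (c :: t) sep
          = if sep.isPrefixOf (c :: t) = true
            then [] :: PySem.Chars.splitOn (List.drop sep.length (c :: t)) sep
            else List.modifyHead (fun x => [c] ++ x) (PySem.Chars.splitOn t sep) := by
        rw [show PySem.Chars.splitOn (c :: t) sep
              = PySem.Chars.splitOn.go sep ((c :: t).length + 1) (c :: t) [] [] from rfl]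
        simp only [List.length_cons]
        rw [PySem.Chars.splitOn.go]
        split
        · rw [ih (t.length + 1) (by omega) _ _ _ (by simp [List.length_drop]; omega)]
          simp [pvModifyHead_id]
        · rw [ih (t.length + 1) (by omega) _ _ _ (by simp)]
          simp
      rw [PySem.Chars.splitOn.go, hsplit]
      split
      · rw [ih f (by omega) _ _ _ (by simp [List.length_drop]; omega)]
        simp [pvModifyHead_id]
      · rw [ih f (by omega) _ _ _ (by omega)]
        rw [pvModifyHead_comp]
        simp

theorem pvSplitOn_nil (sep : List Char) (hsep : sep ≠ []) :
    PySem.Chars.splitOn [] sep = [[]] := by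
  simp [PySem.Chars.splitOn, PySem.Chars.splitOn.go]

theorem pvSplitOn_pref (sep l : List Char) (hsep : sep ≠ []) (hpre : sep <+: l) :
    PySem.Chars.splitOn l sep = [] :: PySem.Chars.splitOn (List.drop sep.length l) sep := by
  have hsl : 1 ≤ sep.length := by cases sep <;> simp_all
  cases l with
  | nil =>
    have : sep = [] := List.prefix_nil.mp hpre
    exact absurd this hsep
  | cons c t =>
    rw [show PySem.Chars.splitOn (c :: t) sep
          = PySem.Chars.splitOn.go sep ((c :: t).length + 1) (c :: t) [] [] from rfl]
    simp only [List.length_cons]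
    rw [PySem.Chars.splitOn.go]
    rw [if_pos (List.isPrefixOf_iff_prefix.mpr hpre)]
    rw [pvSgo_eq sep hsep _ _ _ _ (by simp [List.length_drop]; omega)]
    simp [pvModifyHead_id]

theorem pvSplitOn_cons (sep : List Char) (c : Char) (t : List Char) (hsep : sep ≠ [])
    (hnp : ¬ sep <+: (c :: t)) :
    PySem.Chars.splitOn (c :: t) sep = List.modifyHead (fun x => c :: x) (PySem.Chars.splitOn t sep) := by
  rw [show PySem.Chars.splitOn (c :: t) sep
        = PySem.Chars.splitOn.go sep ((c :: t).length + 1) (c :: t) [] [] from rfl]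
  simp only [List.length_cons]
  rw [PySem.Chars.splitOn.go]
  rw [if_neg (by simpa [List.isPrefixOf_iff_prefix] using hnp)]
  rw [pvSgo_eq sep hsep _ _ _ _ (by simp)]
  simp

theorem pvSplitOn_skip (sep : List Char) (hsep : sep ≠ []) :
    ∀ (u v : List Char), (∀ k < u.length, ¬ sep <+: List.drop k (u ++ v)) →
      PySem.Chars.splitOn (u ++ v) sep = List.modifyHead (fun x => u ++ x) (PySem.Chars.splitOn v sep) := by
  intro u
  induction u with
  | nil => intro v _; simp [pvModifyHead_id]
  | cons c u' ih =>
    intro v h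
    have h0 : ¬ sep <+: (c :: (u' ++ v)) := by
      have := h 0 (by simp)
      simpa using this
    rw [List.cons_append, pvSplitOn_cons sep _ _ hsep h0]
    rw [ih v (fun k hk => by
      have := h (k + 1) (by simp; omega)
      simpa using this)]
    have := pvModifyHead_comp [c] u' (PySem.Chars.splitOn v sep)
    simpa using this

theorem pvSplitOn_none (sep l : List Char) (hsep : sep ≠ [])
    (h : ∀ k, ¬ sep <+: List.drop k l) : PySem.Chars.splitOn l sep = [l] := by
  have := pvSplitOn_skip sep hsep l [] (fun k hk => by simpa using h k)
  simpa [pvSplitOn_nil sep hsep] using this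

-- ---- basic equations for PySem.Chars.find ----
theorem pvFgo_eq (sub : List Char) :
    ∀ (l : List Char) (k : ℕ), PySem.Chars.find.go sub l k
      = if PySem.Chars.find l sub = -1 then -1 else PySem.Chars.find l sub + (k : ℤ) := by
  intro l
  induction l with
  | nil =>
    intro k
    by_cases hs : sub.isEmpty
    · simp [PySem.Chars.find.go, PySem.Chars.find, hs]
    · simp [PySem.Chars.find.go, PySem.Chars.find, hs]
  | cons c t ih =>
    intro k
    rw [PySem.Chars.find.go]
    have hfind : PySem.Chars.find (c :: t) sub
        = if sub.isPrefixOf (c :: t) = true then 0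
          else (if PySem.Chars.find t sub = -1 then -1 else PySem.Chars.find t sub + 1) := by
      rw [show PySem.Chars.find (c :: t) sub = PySem.Chars.find.go sub (c :: t) 0 from rfl]
      rw [PySem.Chars.find.go]
      split
      · rfl
      · rw [ih 1]; norm_num
    rw [hfind]
    have hge := PySem.Chars.neg_one_le_find t sub
    split
    · simp
    · rw [ih (k + 1)]
      split
      · simp_all
      · push_cast; ring_nf; omega

theorem pvFind_pref (sub : List Char) (c : Char) (t : List Char) (hpre : sub <+: (c :: t)) :
    PySem.Chars.find (c :: t) sub = 0 := by
  rw [show PySem.Chars.find (c :: t) sub = PySem.Chars.find.go sub (c :: t) 0 from rfl]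
  rw [PySem.Chars.find.go]
  rw [if_pos (List.isPrefixOf_iff_prefix.mpr hpre)]
  rfl

theorem pvFind_cons (sub : List Char) (c : Char) (t : List Char) (hnp : ¬ sub <+: (c :: t)) :
    PySem.Chars.find (c :: t) sub
      = if PySem.Chars.find t sub = -1 then -1 else PySem.Chars.find t sub + 1 := by
  rw [show PySem.Chars.find (c :: t) sub = PySem.Chars.find.go sub (c :: t) 0 from rfl]
  rw [PySem.Chars.find.go]
  rw [if_neg (by simpa [List.isPrefixOf_iff_prefix] using hnp)]
  rw [pvFgo_eq]
  norm_num

theorem pvFind_mem (c : Char) :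
    ∀ (u : List Char), c ∈ u → ∃ q : ℕ, PySem.Chars.find u [c] = (q : ℤ) ∧ q < u.length ∧
      ∀ v, PySem.Chars.find (u ++ v) [c] = (q : ℤ) := by
  intro u
  induction u with
  | nil => simp
  | cons x u' ih =>
    intro hmem
    by_cases hx : x = c
    · subst hx
      refine ⟨0, pvFind_pref [x] x u' (by simp), by simp, fun v => ?_⟩
      rw [List.cons_append]
      exact pvFind_pref [x] x _ (by simp)
    · have hmem' : c ∈ u' := by
        rcases List.mem_cons.mp hmem with h | h
        · exact absurd h.symm hx
        · exact h
      obtain ⟨q, hq, hlt, happ⟩ := ih hmem'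
      have hnp : ¬ [c] <+: (x :: u') := by
        simp [List.cons_prefix_cons]
        intro h; exact absurd h.symm hx
      refine ⟨q + 1, ?_, by simp; omega, fun v => ?_⟩
      · rw [pvFind_cons [c] x u' hnp, hq]
        split
        · omega
        · push_cast; ring
      · have hnp2 : ¬ [c] <+: (x :: (u' ++ v)) := by
          simp [List.cons_prefix_cons]
          intro h; exact absurd h.symm hx
        rw [List.cons_append, pvFind_cons [c] x _ hnp2, happ v]
        split
        · omega
        · push_cast; ring

-- ---- infix helpers ----
theorem pvPrefix_drop_infix {sub l : List Char} {k : ℕ} (h : sub <+: List.drop k l) :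
    sub <:+: l := h.isInfix.trans (List.drop_suffix k l).isInfix

-- no occurrence of the marker can start inside `u` in `u ++ marker ++ tag ++ w`
theorem pvNoM (cs u w : List Char) (hsub : (u ++ pvTag) <:+: cs)
    (h1 : ¬ pvMarker <:+: cs)
    (h2 : ¬ ("--FIXHREF".toList ++ pvTag) <:+: cs)
    (h3 : ¬ ("--FIXHREF-".toList ++ pvTag) <:+: cs) :
    ∀ k < u.length, ¬ pvMarker <+: List.drop k (u ++ (pvMarker ++ (pvTag ++ w))) := by
  intro k hk hpre
  have hu_cs : u <:+: cs := (List.prefix_append u pvTag).isInfix.trans hsub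
  rw [List.drop_append_of_le_length (le_of_lt hk)] at hpre
  have hlen : (List.drop k u).length = u.length - k := by simp
  have hM11 : pvMarker.length = 11 := by decide
  by_cases h11 : 11 ≤ u.length - k
  · have heq : pvMarker = List.take 11 (List.drop k u) := by
      have := List.prefix_iff_eq_take.mp hpre
      rw [hM11] at this
      rwa [List.take_append_of_le_length (by omega)] at this
    have : pvMarker <:+: u := by
      rw [heq]
      exact (List.take_prefix _ _).isInfix.trans (List.drop_suffix k u).isInfix
    exact h1 (this.trans hu_cs)
  · have hm1 : 1 ≤ u.length - k := by omega
    have hm10 : u.length - k ≤ 10 := by omega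
    have heq : pvMarker = List.drop k u ++ List.take (11 - (u.length - k)) pvMarker := by
      have hx := List.prefix_iff_eq_take.mp hpre
      rw [hM11, List.take_append, hlen] at hx
      rw [List.take_of_length_le (by omega)] at hx
      rwa [List.take_append_of_le_length (by omega)] at hx
    have heq2 : List.take (u.length - k) pvMarker ++ List.drop (u.length - k) pvMarker
        = List.drop k u ++ List.take (11 - (u.length - k)) pvMarker := by
      rw [List.take_append_drop]; exact heq
    obtain ⟨hufst, hsnd⟩ := List.append_inj heq2 (by simp [hM11]; omega)
    have hsuf : List.drop k u <:+ u := List.drop_suffix k u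
    have key : ∀ s : List Char, s <:+ u → (s ++ pvTag) <:+: cs := by
      intro s hs
      obtain ⟨x, hx⟩ := hs
      have hx2 : x ++ (s ++ pvTag) = u ++ pvTag := by rw [← List.append_assoc, hx]
      exact (show (s ++ pvTag) <:+ (u ++ pvTag) from ⟨x, hx2⟩).isInfix.trans hsub
    set m := u.length - k with hmdef
    interval_cases m
    · exact absurd hsnd (by decide)
    · exact absurd hsnd (by decide)
    · exact absurd hsnd (by decide)
    · exact absurd hsnd (by decide)
    · exact absurd hsnd (by decide)
    · exact absurd hsnd (by decide)
    · exact absurd hsnd (by decide)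
    · exact absurd hsnd (by decide)
    · rw [show List.take 9 pvMarker = "--FIXHREF".toList from by decide] at hufst
      exact h2 (hufst ▸ key (List.drop k u) hsuf)
    · rw [show List.take 10 pvMarker = "--FIXHREF-".toList from by decide] at hufst
      exact h3 (hufst ▸ key (List.drop k u) hsuf)

-- no occurrence of the marker can start inside the tag in `tag ++ x`
theorem pvNoMT (x : List Char) : ∀ k < (16 : ℕ), ¬ pvMarker <+: List.drop k (pvTag ++ x) := by
  intro k hk hpre
  have h16 : pvTag.length = 16 := by decide
  rw [List.drop_append_of_le_length (by omega)] at hpre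
  have hklt : k < pvTag.length := by omega
  rw [List.drop_eq_getElem_cons hklt, List.cons_append] at hpre
  rw [show pvMarker = '-' :: "-FIXHREF--".toList from by decide] at hpre
  have : ('-' : Char) = pvTag[k] := (List.cons_prefix_cons.mp hpre).1
  have hmem : ('-' : Char) ∈ pvTag := this ▸ List.getElem_mem hklt
  exact absurd hmem (by decide)

-- ---- A's loop as plain recursion ----
def pvRecA (xml : List Char) (hrefs : List String) : List (List Char) → Int → List Char
  | [], _ => []
  | item :: rest, i =>
    if PySem.Chars.startswith item pvTag then
      pvHdr ++ xml ++ (PySem.List.pyGetD hrefs i "").toList ++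
        (let s := PySem.List.slice item (some (PySem.Chars.find item ['?'])) none
         PySem.List.slice s (some (PySem.Chars.find s ['"'])) none) ++ pvRecA xml hrefs rest (i + 1)
    else item ++ pvRecA xml hrefs rest i

theorem pvFoldA (xml_name : String) (new_href_list : List String) :
    ∀ (items : List (List Char)) (acc : List Char) (i : Int),
      (items.foldl (fun (st : List Char × Int) item =>
        if PySem.Chars.startswith item pvTag then
          let s := PySem.List.slice item (some (PySem.Chars.find item ['?'])) none
          (st.1 ++ pvHdr ++ xml_name.toList ++ (PySem.List.pyGetD new_href_list st.2 "").toList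
             ++ PySem.List.slice s (some (PySem.Chars.find s ['"'])) none, st.2 + 1)
        else (st.1 ++ item, st.2)) (acc, i)).1
      = acc ++ pvRecA xml_name.toList new_href_list items i := by
  intro items
  induction items with
  | nil => intro acc i; simp [pvRecA]
  | cons item rest ih =>
    intro acc i
    rw [List.foldl_cons]
    by_cases hsw : PySem.Chars.startswith item pvTag
    · simp only [hsw, if_pos]
      rw [ih]
      simp [pvRecA, hsw, List.append_assoc]
    · simp only [hsw]
      rw [if_neg (by simp [hsw])]
      rw [ih]
      simp only [pvRecA, if_neg (by simp [hsw] : ¬ (PySem.Chars.startswith item pvTag = true))]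
      simp [List.append_assoc]

-- processing one well-formed tag item
theorem pvPiece (xml : List Char) (hrefs : List String) (i : Int) (p : List Char)
    (rest : List (List Char)) (q : ℕ) (hq : PySem.Chars.find p ['"'] = (q : ℤ)) :
    pvRecA xml hrefs ((pvTag ++ p) :: rest) i
      = pvHdr ++ xml ++ (PySem.List.pyGetD hrefs i "").toList ++ List.drop q p
          ++ pvRecA xml hrefs rest (i + 1) := by
  have hsw : PySem.Chars.startswith (pvTag ++ p) pvTag :=
    (PySem.Chars.startswith_iff _ _).mpr (List.prefix_append _ _)
  have hfq : PySem.Chars.find (pvTag ++ p) ['?'] = (15 : ℤ) := by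
    obtain ⟨q', hq', _, happ'⟩ := pvFind_mem '?' pvTag (by decide)
    have h15 : PySem.Chars.find pvTag ['?'] = (15 : ℤ) := by decide
    rw [happ' p]; rw [hq'] at h15; exact h15
  have hs1 : PySem.List.slice (pvTag ++ p) (some (15 : ℤ)) none = '?' :: p := by
    rw [PySem.List.slice_from _ (by norm_num : (0:ℤ) ≤ 15)]
    rw [show ((15:ℤ)).toNat = 15 from rfl]
    rw [List.drop_append_of_le_length (by decide)]
    rw [show List.drop 15 pvTag = ['?'] from by decide]
    rfl
  have hnq : ¬ ['"'] <+: ('?' :: p) := by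
    rw [List.cons_prefix_cons]
    rintro ⟨h, -⟩
    exact absurd h (by decide)
  have hf2 : PySem.Chars.find ('?' :: p) ['"'] = ((q : ℤ) + 1) := by
    rw [pvFind_cons _ _ _ hnq, hq]
    split
    · omega
    · rfl
  have hs2 : PySem.List.slice ('?' :: p) (some ((q : ℤ) + 1)) none = List.drop q p := by
    rw [show ((q : ℤ) + 1) = ((q + 1 : ℕ) : ℤ) from by push_cast; ring]
    rw [PySem.List.slice_from _ (by positivity)]
    simp
  show (if PySem.Chars.startswith (pvTag ++ p) pvTag = true then _ else _) = _
  rw [if_pos hsw]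
  simp only [hfq, hs1, hf2, hs2]

-- B stops when no tag is left
theorem pvAltGo_stop (xml : List Char) (hrefs : List String) (f : ℕ) (rest : List Char) (i : Int)
    (h : PySem.Chars.find rest pvTag = -1) : pvAltGo xml hrefs f rest i = rest := by
  cases f <;> simp [pvAltGo, h]

-- ---- the main equivalence ----
theorem pvMain (xml : List Char) (hrefs : List String) :
    ∀ (fuel : ℕ) (cs : List Char) (i : Int), cs.length < fuel →
      ¬ pvMarker <:+: cs →
      ¬ ("--FIXHREF".toList ++ pvTag) <:+: cs →
      ¬ ("--FIXHREF-".toList ++ pvTag) <:+: cs →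
      (∀ p ∈ (PySem.Chars.splitOn cs pvTag).tail, ('"' : Char) ∈ p) →
      pvRecA xml hrefs
        (PySem.Chars.splitOn (PySem.Chars.replace cs pvTag (pvMarker ++ pvTag)) pvMarker) i
        = pvAltGo xml hrefs fuel cs i := by
  have hTne : pvTag ≠ [] := by decide
  have hMne : pvMarker ≠ [] := by decide
  have hT16 : pvTag.length = 16 := by decide
  have hM11 : pvMarker.length = 11 := by decide
  intro fuel
  induction fuel using Nat.strong_induction_on with
  | _ fuel ih =>
    intro cs i hlen h1 h2 h3 h4
    match fuel with
    | 0 => exact absurd hlen (by omega)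
    | f + 1 =>
    by_cases hj : PySem.Chars.find cs pvTag = -1
    · have hnoT : ¬ pvTag <:+: cs := (PySem.Chars.find_eq_neg_one_iff cs pvTag).mp hj
      have hnoTk : ∀ k, ¬ pvTag <+: List.drop k cs := fun k h => hnoT (pvPrefix_drop_infix h)
      have hnoMk : ∀ k, ¬ pvMarker <+: List.drop k cs := fun k h => h1 (pvPrefix_drop_infix h)
      rw [pvReplace_none _ _ cs hTne hnoTk, pvSplitOn_none _ cs hMne hnoMk]
      have hsw : ¬ PySem.Chars.startswith cs pvTag = true := by
        rw [PySem.Chars.startswith_iff]; exact fun h => hnoT h.isInfix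
      simp [pvRecA, hsw, pvAltGo, hj]
    · have h0 : 0 ≤ PySem.Chars.find cs pvTag := by
        have := PySem.Chars.neg_one_le_find cs pvTag; omega
      obtain ⟨hpre, hmin⟩ := PySem.Chars.find_spec h0
      set jn := (PySem.Chars.find cs pvTag).toNat with hjn
      obtain ⟨b, hb⟩ := hpre
      set a := cs.take jn with hadef
      have hcs : cs = a ++ (pvTag ++ b) := by rw [hadef, hb, List.take_append_drop]
      have hlcs : cs.length = jn + (16 + b.length) := by
        have hlen2 := congrArg List.length hcs
        simp [hT16] at hlen2
        have hjle : jn ≤ cs.length := by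
          by_contra hcon
          push_neg at hcon
          rw [hadef] at hlen2
          simp [List.length_take] at hlen2
          omega
        rw [hadef] at hlen2
        simp [List.length_take, Nat.min_eq_left hjle] at hlen2
        omega
      have ha_len : a.length = jn := by
        rw [hadef, List.length_take]; omega
      have hmin' : ∀ k < a.length, ¬ pvTag <+: List.drop k (a ++ (pvTag ++ b)) := by
        intro k hk
        rw [← hcs]
        exact hmin k (by omega)
      have hminM : ∀ k < a.length, ¬ pvMarker <+: List.drop k (a ++ (pvMarker ++ (pvTag ++ PySem.Chars.replace b pvTag (pvMarker ++ pvTag)))) :=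
        pvNoM cs a _ (by rw [hcs, ← List.append_assoc]; exact ⟨[], b, by simp⟩) h1 h2 h3
      have hrepl : PySem.Chars.replace cs pvTag (pvMarker ++ pvTag)
          = a ++ (pvMarker ++ (pvTag ++ PySem.Chars.replace b pvTag (pvMarker ++ pvTag))) := by
        conv_lhs => rw [hcs]
        rw [pvReplace_skip _ _ hTne a (pvTag ++ b) hmin']
        rw [pvReplace_pref _ _ _ hTne (List.prefix_append _ _)]
        rw [List.drop_left]
        simp [List.append_assoc]
      have hsplitcs : PySem.Chars.splitOn cs pvTag = a :: PySem.Chars.splitOn b pvTag := by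
        conv_lhs => rw [hcs]
        rw [pvSplitOn_skip _ hTne a (pvTag ++ b) hmin']
        rw [pvSplitOn_pref _ _ hTne (List.prefix_append _ _)]
        rw [List.drop_left]
        simp
      have h4' : ∀ p ∈ PySem.Chars.splitOn b pvTag, ('"' : Char) ∈ p := by
        intro p hp
        exact h4 p (by rw [hsplitcs]; simpa using hp)
      have hb_suf : b <:+ cs := by rw [hcs, ← List.append_assoc]; exact ⟨a ++ pvTag, rfl⟩
      have hb_inf : ∀ {z : List Char}, z <:+: b → z <:+: cs := fun hz => hz.trans hb_suf.isInfix
      have hswa : ¬ PySem.Chars.startswith a pvTag = true := by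
        rw [PySem.Chars.startswith_iff]
        intro hTa
        have h16a : 16 ≤ a.length := by
          have := hTa.length_le; omega
        have hmin0 := hmin 0 (by omega)
        simp at hmin0
        exact hmin0 (hTa.trans (List.take_prefix jn cs))
      have hjval : PySem.Chars.find cs pvTag = (jn : ℤ) := by omega
      have hslA : PySem.List.slice cs none (some (PySem.Chars.find cs pvTag)) = a := by
        rw [hjval, PySem.List.slice_to _ (by omega : (0:ℤ) ≤ (jn : ℤ))]
        simp [hadef]
      have hdropb : PySem.List.slice cs (some (PySem.Chars.find cs pvTag + 16)) none = b := by
        rw [hjval, show ((jn : ℤ) + 16) = ((jn + 16 : ℕ) : ℤ) from by push_cast; ring]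
        rw [PySem.List.slice_from _ (by omega)]
        rw [Int.toNat_natCast]
        rw [← List.drop_drop, ← hb]
        rw [← hT16, List.drop_left]
      by_cases hjb : PySem.Chars.find b pvTag = -1
      · have hnoTb : ¬ pvTag <:+: b := (PySem.Chars.find_eq_neg_one_iff b pvTag).mp hjb
        have hnoTbk : ∀ k, ¬ pvTag <+: List.drop k b := fun k h => hnoTb (pvPrefix_drop_infix h)
        have hnoMbk : ∀ k, ¬ pvMarker <+: List.drop k b := fun k h =>
          h1 (hb_inf (pvPrefix_drop_infix h))
        have hsplitb : PySem.Chars.splitOn b pvTag = [b] := pvSplitOn_none _ b hTne hnoTbk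
        have hqb : ('"' : Char) ∈ b := h4' b (by rw [hsplitb]; simp)
        obtain ⟨q, hq, hqlt, happ⟩ := pvFind_mem '"' b hqb
        have hreplb : PySem.Chars.replace b pvTag (pvMarker ++ pvTag) = b :=
          pvReplace_none _ _ b hTne hnoTbk
        have hitems : PySem.Chars.splitOn (PySem.Chars.replace cs pvTag (pvMarker ++ pvTag)) pvMarker
            = [a, pvTag ++ b] := by
          rw [hrepl, hreplb]
          rw [pvSplitOn_skip _ hMne a _ (by rw [hreplb] at hminM; exact hminM)]
          rw [pvSplitOn_pref _ _ hMne (List.prefix_append _ _)]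
          rw [List.drop_left]
          rw [pvSplitOn_skip _ hMne pvTag b (by rw [hT16]; exact pvNoMT b)]
          rw [pvSplitOn_none _ b hMne hnoMbk]
          simp
        rw [hitems]
        have hrecA : pvRecA xml hrefs [a, pvTag ++ b] i
            = a ++ (pvHdr ++ xml ++ (PySem.List.pyGetD hrefs i "").toList ++ List.drop q b) := by
          show (if PySem.Chars.startswith a pvTag = true then _ else _) = _
          rw [if_neg hswa]
          rw [pvPiece xml hrefs i b [] q hq]
          simp [pvRecA]
        rw [hrecA]
        rw [show pvAltGo xml hrefs (f + 1) cs i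
              = if PySem.Chars.find cs pvTag = -1 then cs
                else PySem.List.slice cs none (some (PySem.Chars.find cs pvTag)) ++ pvHdr ++ xml
                  ++ (PySem.List.pyGetD hrefs i "").toList
                  ++ pvAltGo xml hrefs f
                    (let tail := PySem.List.slice cs (some (PySem.Chars.find cs pvTag + 16)) none
                     let q := PySem.Chars.find tail ['"']
                     if q = -1 then [] else PySem.List.slice tail (some q) none) (i + 1)
              from by rw [pvAltGo]]
        rw [if_neg hj]
        simp only [hdropb, hslA, hq]
        rw [if_neg (by omega)]
        rw [PySem.List.slice_from _ (by omega), Int.toNat_natCast]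
        rw [pvAltGo_stop xml hrefs f (List.drop q b) (i + 1) (by
          rw [PySem.Chars.find_eq_neg_one_iff]
          exact fun h => hnoTb (h.trans (List.drop_suffix q b).isInfix))]
        simp [List.append_assoc]
      · have h0b : 0 ≤ PySem.Chars.find b pvTag := by
          have := PySem.Chars.neg_one_le_find b pvTag; omega
        obtain ⟨hpre2, hmin2⟩ := PySem.Chars.find_spec h0b
        set jn2 := (PySem.Chars.find b pvTag).toNat with hjn2
        obtain ⟨b2, hb2⟩ := hpre2
        set p1 := b.take jn2 with hp1def
        have hbdec : b = p1 ++ (pvTag ++ b2) := by rw [hp1def, hb2, List.take_append_drop]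
        have hlb : b.length = jn2 + (16 + b2.length) := by
          have hlen2 := congrArg List.length hbdec
          simp [hT16] at hlen2
          have hjle : jn2 ≤ b.length := by
            by_contra hcon
            push_neg at hcon
            rw [hp1def] at hlen2
            simp [List.length_take] at hlen2
            omega
          rw [hp1def] at hlen2
          simp [List.length_take, Nat.min_eq_left hjle] at hlen2
          omega
        have hp1_len : p1.length = jn2 := by rw [hp1def, List.length_take]; omega
        have hmin2' : ∀ k < p1.length, ¬ pvTag <+: List.drop k (p1 ++ (pvTag ++ b2)) := by
          intro k hk
          rw [← hbdec]
          exact hmin2 k (by omega)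
        have hsplitb : PySem.Chars.splitOn b pvTag = p1 :: PySem.Chars.splitOn b2 pvTag := by
          conv_lhs => rw [hbdec]
          rw [pvSplitOn_skip _ hTne p1 (pvTag ++ b2) hmin2']
          rw [pvSplitOn_pref _ _ hTne (List.prefix_append _ _)]
          rw [List.drop_left]
          simp
        have hq1 : ('"' : Char) ∈ p1 := h4' p1 (by rw [hsplitb]; simp)
        obtain ⟨q, hq, hqlt, happ⟩ := pvFind_mem '"' p1 hq1
        have hfb : PySem.Chars.find b ['"'] = (q : ℤ) := by
          conv_lhs => rw [hbdec]
          exact happ _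
        set rest := List.drop q b with hrest
        have hrest_eq : rest = List.drop q p1 ++ (pvTag ++ b2) := by
          rw [hrest]
          conv_lhs => rw [hbdec]
          rw [List.drop_append_of_le_length (by omega)]
        have hrest_suf : rest <:+ cs := ((List.drop_suffix q b).trans hb_suf)
        have hrest_inf : ∀ {z : List Char}, z <:+: rest → z <:+: cs :=
          fun hz => hz.trans hrest_suf.isInfix
        have hreplb : PySem.Chars.replace b pvTag (pvMarker ++ pvTag)
            = p1 ++ (pvMarker ++ (pvTag ++ PySem.Chars.replace b2 pvTag (pvMarker ++ pvTag))) := by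
          conv_lhs => rw [hbdec]
          rw [pvReplace_skip _ _ hTne p1 (pvTag ++ b2) hmin2']
          rw [pvReplace_pref _ _ _ hTne (List.prefix_append _ _)]
          rw [List.drop_left]
          simp [List.append_assoc]
        have hsubTp1 : (p1 ++ pvTag) <:+: cs := by
          rw [hcs, hbdec]
          exact ⟨a ++ pvTag, b2, by simp [List.append_assoc]⟩
        have hminMp1 := pvNoM cs p1 (PySem.Chars.replace b2 pvTag (pvMarker ++ pvTag)) hsubTp1 h1 h2 h3
        have hitems : PySem.Chars.splitOn (PySem.Chars.replace cs pvTag (pvMarker ++ pvTag)) pvMarker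
            = a :: (pvTag ++ p1)
                :: List.modifyHead (fun x => pvTag ++ x)
                     (PySem.Chars.splitOn (PySem.Chars.replace b2 pvTag (pvMarker ++ pvTag)) pvMarker) := by
          rw [hrepl, hreplb]
          rw [pvSplitOn_skip _ hMne a _ (by rw [hreplb] at hminM; exact hminM)]
          rw [pvSplitOn_pref _ _ hMne (List.prefix_append _ _)]
          rw [List.drop_left]
          rw [pvSplitOn_skip _ hMne pvTag _ (by rw [hT16]; exact pvNoMT _)]
          rw [pvSplitOn_skip _ hMne p1 _ hminMp1]
          rw [pvSplitOn_pref _ _ hMne (List.prefix_append _ _)]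
          rw [List.drop_left]
          rw [pvSplitOn_skip _ hMne pvTag _ (by rw [hT16]; exact pvNoMT _)]
          cases hX : PySem.Chars.splitOn (PySem.Chars.replace b2 pvTag (pvMarker ++ pvTag)) pvMarker with
          | nil => simp
          | cons hd tl => simp
        rw [hitems]
        have hrecA : pvRecA xml hrefs (a :: (pvTag ++ p1)
              :: List.modifyHead (fun x => pvTag ++ x)
                   (PySem.Chars.splitOn (PySem.Chars.replace b2 pvTag (pvMarker ++ pvTag)) pvMarker)) i
            = a ++ (pvHdr ++ xml ++ (PySem.List.pyGetD hrefs i "").toList ++ List.drop q p1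
                ++ pvRecA xml hrefs
                     (List.modifyHead (fun x => pvTag ++ x)
                       (PySem.Chars.splitOn (PySem.Chars.replace b2 pvTag (pvMarker ++ pvTag)) pvMarker)) (i + 1)) := by
          show (if PySem.Chars.startswith a pvTag = true then _ else _) = _
          rw [if_neg hswa]
          rw [pvPiece xml hrefs i p1 _ q hq]
        rw [hrecA]
        rw [show pvAltGo xml hrefs (f + 1) cs i
              = if PySem.Chars.find cs pvTag = -1 then cs
                else PySem.List.slice cs none (some (PySem.Chars.find cs pvTag)) ++ pvHdr ++ xml
                  ++ (PySem.List.pyGetD hrefs i "").toList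
                  ++ pvAltGo xml hrefs f
                    (let tail := PySem.List.slice cs (some (PySem.Chars.find cs pvTag + 16)) none
                     let q := PySem.Chars.find tail ['"']
                     if q = -1 then [] else PySem.List.slice tail (some q) none) (i + 1)
              from by rw [pvAltGo]]
        rw [if_neg hj]
        simp only [hdropb, hslA, hfb]
        rw [if_neg (by omega)]
        rw [PySem.List.slice_from _ (by omega), Int.toNat_natCast]
        have hlrest : (List.drop q b).length < f := by
          simp only [List.length_drop]
          omega
        have hdropdrop : ∀ k, k < (List.drop q p1).length →
            ¬ pvTag <+: List.drop k (List.drop q p1 ++ (pvTag ++ b2)) := by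
          intro k hk
          have hkq : q + k < jn2 := by
            simp only [List.length_drop] at hk; omega
          rw [← hrest_eq, hrest, List.drop_drop]
          exact hmin2 (q + k) (by omega)
        have hrsplit : PySem.Chars.splitOn rest pvTag
            = List.drop q p1 :: PySem.Chars.splitOn b2 pvTag := by
          rw [hrest_eq]
          rw [pvSplitOn_skip _ hTne (List.drop q p1) (pvTag ++ b2) hdropdrop]
          rw [pvSplitOn_pref _ _ hTne (List.prefix_append _ _)]
          rw [List.drop_left]
          simp
        have h4r : ∀ p ∈ (PySem.Chars.splitOn rest pvTag).tail, ('"' : Char) ∈ p := by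
          intro p hp
          rw [hrsplit] at hp
          simp at hp
          exact h4' p (by rw [hsplitb]; simp [hp])
        have hIH := ih f (by omega) rest (i + 1) (by rw [hrest]; exact hlrest)
          (fun h => h1 (hrest_inf h)) (fun h => h2 (hrest_inf h)) (fun h => h3 (hrest_inf h)) h4r
        rw [hrest] at hIH
        rw [← hIH]
        have hminMdq := pvNoM cs (List.drop q p1) (PySem.Chars.replace b2 pvTag (pvMarker ++ pvTag))
          (by
            have hsuf : (List.drop q p1 ++ pvTag) <:+ (p1 ++ pvTag) := by
              obtain ⟨x, hx⟩ : List.drop q p1 <:+ p1 := List.drop_suffix q p1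
              exact ⟨x, by rw [← List.append_assoc, hx]⟩
            exact hsuf.isInfix.trans hsubTp1) h1 h2 h3
        have hreplr : PySem.Chars.replace (List.drop q b) pvTag (pvMarker ++ pvTag)
            = List.drop q p1 ++ (pvMarker ++ (pvTag ++ PySem.Chars.replace b2 pvTag (pvMarker ++ pvTag))) := by
          rw [show List.drop q b = List.drop q p1 ++ (pvTag ++ b2) from by rw [← hrest_eq, hrest]]
          rw [pvReplace_skip _ _ hTne (List.drop q p1) (pvTag ++ b2) hdropdrop]
          rw [pvReplace_pref _ _ _ hTne (List.prefix_append _ _)]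
          rw [List.drop_left]
          simp [List.append_assoc]
        have hitemsr : PySem.Chars.splitOn (PySem.Chars.replace (List.drop q b) pvTag (pvMarker ++ pvTag)) pvMarker
            = List.drop q p1
                :: List.modifyHead (fun x => pvTag ++ x)
                     (PySem.Chars.splitOn (PySem.Chars.replace b2 pvTag (pvMarker ++ pvTag)) pvMarker) := by
          rw [hreplr]
          rw [pvSplitOn_skip _ hMne (List.drop q p1) _ hminMdq]
          rw [pvSplitOn_pref _ _ hMne (List.prefix_append _ _)]
          rw [List.drop_left]
          rw [pvSplitOn_skip _ hMne pvTag _ (by rw [hT16]; exact pvNoMT _)]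
          cases hX : PySem.Chars.splitOn (PySem.Chars.replace b2 pvTag (pvMarker ++ pvTag)) pvMarker with
          | nil => simp
          | cons hd tl => simp
        rw [hitemsr]
        have hswdq : ¬ PySem.Chars.startswith (List.drop q p1) pvTag = true := by
          rw [PySem.Chars.startswith_iff]
          intro hTd
          have hTq : pvTag <+: List.drop q b := by
            rw [show List.drop q b = List.drop q p1 ++ (pvTag ++ b2) from by rw [← hrest_eq, hrest]]
            exact hTd.trans (List.prefix_append _ _)
          exact hmin2 q (by omega) hTq
        rw [show pvRecA xml hrefs (List.drop q p1
              :: List.modifyHead (fun x => pvTag ++ x)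
                   (PySem.Chars.splitOn (PySem.Chars.replace b2 pvTag (pvMarker ++ pvTag)) pvMarker)) (i + 1)
            = List.drop q p1 ++ pvRecA xml hrefs
                (List.modifyHead (fun x => pvTag ++ x)
                  (PySem.Chars.splitOn (PySem.Chars.replace b2 pvTag (pvMarker ++ pvTag)) pvMarker)) (i + 1)
            from by
          show (if PySem.Chars.startswith (List.drop q p1) pvTag = true then _ else _) = _
          rw [if_neg hswdq]]
        simp [List.append_assoc]

-- ===== VERDICT (by name: the statement is the Claim_ definition above) =====
theorem rename_embedded_img_href_spec : Claim_equal_rename_embedded_img_href := by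
  intro content xml_name new_href_list hdom hpre
  unfold Spec_rename_embedded_img_href
  obtain ⟨hlen, hquote, hm1, hm2, hm3⟩ := hpre
  have h1 : ¬ pvMarker <:+: content.toList := fun h =>
    absurd ((PySem.Chars.isIn_iff_infix _ _).mpr h) (by simpa using hm1)
  have h2 : ¬ ("--FIXHREF".toList ++ pvTag) <:+: content.toList := fun h =>
    absurd ((PySem.Chars.isIn_iff_infix _ _).mpr h) (by simpa using hm2)
  have h3 : ¬ ("--FIXHREF-".toList ++ pvTag) <:+: content.toList := fun h =>
    absurd ((PySem.Chars.isIn_iff_infix _ _).mpr h) (by simpa using hm3)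
  have h4 : ∀ p ∈ (PySem.Chars.splitOn content.toList pvTag).tail, ('"' : Char) ∈ p := by
    intro p hp
    have := hquote p hp
    rw [PySem.Chars.isIn_iff_infix] at this
    exact (List.singleton_infix_iff _ _).mp this
  show String.ofList _ = _
  rw [pvFoldA xml_name new_href_list _ [] 0]
  rw [List.nil_append]
  rw [pvMain xml_name.toList new_href_list (content.toList.length + 1) content.toList 0
      (by omega) h1 h2 h3 h4]
  rfl
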